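-- pv_equiv track=rewrite | github.com/max4vich/algo_part_3 | gardener.py | gardener_count
-- ===== SOURCE A (Python) =====
-- def gardener_count(m, n):  # m - рядки, а n - стовпці
--     result_array = []
--     for i in range(m):
--         for j in range(n):
--             if i % 2 == 0:
--                 result_array.append(i * n + j + 1)
--             else:
--                 result_array.append(i * n + n - j)
--     return result_array
-- ===== SOURCE B (Python) =====
-- def gardener_count(m, n):
--     if m <= 0 or n <= 0:
--         return []
--     res = list(range(1, m * n + 1))
--     for i in range(m):
--         if i % 2:
--             res[i * n:(i + 1) * n] = res[i * n:(i + 1) * n][::-1]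
--     return res
-- ===== Notes on version B (the rewrite author's own statement) =====
-- stated objective: alternative
-- what changed: Instead of computing each cell from a per-cell parity formula in nested loops, B builds the whole flat sequential numbering list(range(1, m*n+1)) once and then reverses each odd row's contiguous block in place by slice assignment.
import Mathlib
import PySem

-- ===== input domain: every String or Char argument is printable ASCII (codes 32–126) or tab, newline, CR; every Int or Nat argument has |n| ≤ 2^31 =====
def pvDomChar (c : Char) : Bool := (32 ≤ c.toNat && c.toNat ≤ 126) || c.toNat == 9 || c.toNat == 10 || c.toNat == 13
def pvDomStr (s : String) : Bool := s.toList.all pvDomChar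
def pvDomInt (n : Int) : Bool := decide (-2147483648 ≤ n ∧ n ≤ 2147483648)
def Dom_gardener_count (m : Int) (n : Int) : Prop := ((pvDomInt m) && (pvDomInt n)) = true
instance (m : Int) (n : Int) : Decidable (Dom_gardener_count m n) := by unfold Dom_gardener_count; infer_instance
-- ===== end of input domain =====

-- B builds the flat sequential numbering 1..m*n once and then reverses each odd row's
-- contiguous block (slice assignment), instead of A's per-cell parity formula in nested loops.

-- ===== PORT A =====
def gardener_count (m : Int) (n : Int) : List Int :=
  (PySem.List.pyRange 0 m 1).foldl (fun acc i =>
    (PySem.List.pyRange 0 n 1).foldl (fun acc2 j =>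
      if i % 2 == 0 then acc2 ++ [i * n + j + 1] else acc2 ++ [i * n + n - j]) acc) []

-- ===== PORT B =====
def gardener_count_alt (m : Int) (n : Int) : List Int :=
  if m ≤ 0 ∨ n ≤ 0 then []
  else
    (PySem.List.pyRange 0 m 1).foldl (fun res i =>
      if i % 2 ≠ 0 then
        PySem.List.slice res none (some (i * n)) ++
          (PySem.List.slice res (some (i * n)) (some ((i + 1) * n))).reverse ++
          PySem.List.slice res (some ((i + 1) * n)) none
      else res)
      (PySem.List.pyRange 1 (m * n + 1) 1)

-- ===== PRECONDITION & SPEC =====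
def Spec_gardener_count (m : Int) (n : Int) (out : List Int) : Prop := out = gardener_count_alt m n
instance (m : Int) (n : Int) (out : List Int) : Decidable (Spec_gardener_count m n out) := by unfold Spec_gardener_count; infer_instance

-- ===== CLAIM (what is proved, stated in full; the proofs are below) =====
def Claim_equal_gardener_count : Prop := ∀ (m : Int) (n : Int), Dom_gardener_count m n → Spec_gardener_count m n (gardener_count m n)

-- ===== LEMMAS AND PROOFS =====

/-- Row `i` of the snake numbering, left-to-right (the even-row values). -/
def rowNat (N i : ℕ) : List Int := (List.range N).map (fun j => ((i * N + j + 1 : ℕ) : Int))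

lemma length_rowNat (N i : ℕ) : (rowNat N i).length = N := by simp [rowNat]

/-- A's odd-row values are the reversed left-to-right row. -/
lemma rowOdd_eq_reverse (N i : ℕ) :
    (List.range N).map (fun j : ℕ => ((i * N : ℕ) : Int) + (N : Int) - (j : Int))
      = (rowNat N i).reverse := by
  apply List.ext_getElem
  · simp [rowNat]
  · intro k h1 h2
    rw [List.getElem_reverse]
    simp only [rowNat, List.getElem_map, List.getElem_range, List.length_map, List.length_range]
    have hk : k < N := by simpa using h1
    push_cast
    omega

/-- The sequential numbering 1..M*N is the concatenation of the left-to-right rows. -/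
lemma range_flatten (N : ℕ) : ∀ (M : ℕ),
    (List.range (M * N)).map (fun k : ℕ => (1 : Int) + (k : Int))
      = ((List.range M).map (rowNat N)).flatten := by
  intro M
  induction M with
  | zero => simp
  | succ M ih =>
    rw [List.range_succ, List.map_append, List.flatten_append, ← ih,
      Nat.succ_mul, List.range_add, List.map_append, List.map_map]
    simp only [List.map_singleton, List.flatten_cons, List.flatten_nil, List.append_nil]
    congr 1
    simp only [rowNat]
    apply List.map_congr_left
    intro j hj
    simp only [Function.comp]
    push_cast
    ring

/-- Reversing the block of row `k` inside the flattened grid reverses exactly that row. -/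
lemma block_reverse (N : ℕ) : ∀ (rows : List (List Int)) (k : ℕ),
    (∀ r ∈ rows, r.length = N) →
    (rows.flatten.take (k * N) ++ ((rows.flatten.drop (k * N)).take ((k + 1) * N - k * N)).reverse
      ++ rows.flatten.drop ((k + 1) * N))
    = (rows.set k (rows[k]!.reverse)).flatten := by
  intro rows
  induction rows with
  | nil => intro k _; simp
  | cons r rest ih =>
    intro k hlen
    have hr : r.length = N := hlen r (by simp)
    cases k with
    | zero =>
      simp only [Nat.zero_mul, List.take_zero, List.nil_append, List.drop_zero,
        List.set_cons_zero, List.flatten_cons, Nat.sub_zero]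
      have e : (0 + 1) * N = N := by ring
      rw [e]
      have h1 : (r ++ rest.flatten).take N = r := by
        rw [List.take_append_of_le_length (by omega)]; simp [hr]
      have h2 : (r ++ rest.flatten).drop N = rest.flatten := by
        rw [List.drop_append_of_le_length (by omega)]; simp [hr]
      rw [h1, h2]
      simp
    | succ k =>
      simp only [List.flatten_cons, List.set_cons_succ]
      have e1 : ((k + 1) * N) = N + k * N := by ring
      have e2 : ((k + 1 + 1) * N) = N + (k + 1) * N := by ring
      have t1 : (r ++ rest.flatten).take ((k + 1) * N) = r ++ rest.flatten.take (k * N) := by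
        rw [e1, List.take_append]
        congr 1
        · rw [List.take_of_length_le (by omega)]
        · congr 1; omega
      have d1 : (r ++ rest.flatten).drop ((k + 1) * N) = rest.flatten.drop (k * N) := by
        rw [e1, List.drop_append]
        rw [List.drop_of_length_le (by omega), List.nil_append]
        congr 1; omega
      have d2 : (r ++ rest.flatten).drop ((k + 1 + 1) * N) = rest.flatten.drop ((k + 1) * N) := by
        rw [e2, List.drop_append]
        rw [List.drop_of_length_le (by omega), List.nil_append]
        congr 1; omega
      have harith : ((k + 1 + 1) * N - (k + 1) * N) = ((k + 1) * N - k * N) := by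
        have a1 : (k + 1 + 1) * N = (k + 1) * N + N := by ring
        have a2 : (k + 1) * N = k * N + N := by ring
        omega
      have egetd : (r :: rest)[k + 1]! = rest[k]! := by
        simp [List.getElem!_eq_getElem?_getD]
      have hrec := ih k (fun r hrm => hlen r (by simp [hrm]))
      rw [t1, d1, d2, harith, egetd, ← hrec]
      simp [List.append_assoc]

/-- The guarded set-with-reverse fold over distinct indices, read back elementwise. -/
lemma foldl_set_getElem? : ∀ (idxs : List ℕ), idxs.Nodup → ∀ (rows : List (List Int)) (k : ℕ),
    (idxs.foldl (fun rs i => if i % 2 = 1 then rs.set i (rs[i]!.reverse) else rs) rows)[k]?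
    = if k ∈ idxs ∧ k % 2 = 1 then rows[k]?.map List.reverse else rows[k]? := by
  intro idxs
  induction idxs with
  | nil => intro _ rows k; simp
  | cons i is ih =>
    intro hnd rows k
    have hni : i ∉ is := (List.nodup_cons.mp hnd).1
    have hnd' : is.Nodup := (List.nodup_cons.mp hnd).2
    simp only [List.foldl_cons]
    rw [ih hnd']
    by_cases hki : k = i
    · subst hki
      have hknotin : k ∉ is := hni
      by_cases hp : k % 2 = 1
      · simp only [hp, if_pos, hknotin, List.mem_cons, true_or, and_true]
        by_cases hk : k < rows.length
        · rw [if_neg (by tauto), List.getElem?_set_self (by simpa using hk)]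
          have hbang : rows[k]! = rows[k] := by
            rw [List.getElem!_eq_getElem?_getD, List.getElem?_eq_getElem hk]; rfl
          simp [List.getElem?_eq_getElem hk, hbang]
        · have h1 : rows[k]? = none := by
            rw [List.getElem?_eq_none_iff]; omega
          have h2 : (rows.set k (rows[k]!.reverse))[k]? = none := by
            rw [List.getElem?_eq_none_iff]; simp only [List.length_set]; omega
          rw [if_neg (by tauto)]
          simp [h1, h2]
          omega
      · simp [hp, hknotin]
    · by_cases hp2 : i % 2 = 1
      · rw [if_pos hp2, List.getElem?_set_ne (by omega)]
        by_cases hkin : k ∈ is <;> simp [hkin, hki]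
      · rw [if_neg hp2]
        by_cases hkin : k ∈ is <;> simp [hkin, hki]

/-- Transfer B's flat-list fold to a rows-level fold of guarded sets. -/
lemma flat_fold (N : ℕ) : ∀ (ks : List ℕ) (rows : List (List Int)),
    (∀ r ∈ rows, r.length = N) → (∀ j ∈ ks, j < rows.length) →
    (List.foldl (fun (res : List Int) (i : Int) =>
        if i % 2 ≠ 0 then
          PySem.List.slice res none (some (i * (N : Int))) ++
            (PySem.List.slice res (some (i * (N : Int))) (some ((i + 1) * (N : Int)))).reverse ++
            PySem.List.slice res (some ((i + 1) * (N : Int))) none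
        else res) rows.flatten (ks.map (fun k : ℕ => (k : Int))))
    = (ks.foldl (fun rs k => if k % 2 = 1 then rs.set k (rs[k]!.reverse) else rs) rows).flatten := by
  intro ks
  induction ks with
  | nil => intro rows _ _; rfl
  | cons k ks ih =>
    intro rows hlen hbnd
    have hkrow : k < rows.length := hbnd k (by simp)
    simp only [List.map_cons, List.foldl_cons]
    have hcond : (((k : ℕ) : Int) % 2 ≠ 0) ↔ (k % 2 = 1) := by
      constructor <;> intro h <;> omega
    have hbang : rows[k]! = rows[k] := by
      rw [List.getElem!_eq_getElem?_getD, List.getElem?_eq_getElem hkrow]; rfl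
    by_cases hp : k % 2 = 1
    · rw [if_pos (hcond.mpr hp), if_pos hp]
      have hc1 : ((k : ℕ) : Int) * (N : Int) = (((k * N : ℕ)) : Int) := by push_cast; ring
      have hc2 : (((k : ℕ) : Int) + 1) * (N : Int) = ((((k + 1) * N : ℕ)) : Int) := by
        push_cast; ring
      rw [hc1, hc2, PySem.List.slice_to_natCast, PySem.List.slice_natCast,
        PySem.List.slice_from_natCast, block_reverse N rows k hlen]
      apply ih
      · intro r hr
        rcases List.mem_or_eq_of_mem_set hr with h | h
        · exact hlen r h
        · subst h
          rw [hbang, List.length_reverse]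
          exact hlen _ (List.getElem_mem hkrow)
      · intro j hj
        rw [List.length_set]
        exact hbnd j (by simp [hj])
    · rw [if_neg (fun hc => hp (hcond.mp hc)), if_neg hp]
      exact ih rows hlen (fun j hj => hbnd j (by simp [hj]))

/-- The rows-level fold over `range M` reverses exactly the odd rows. -/
lemma rowsFold_eq (M N : ℕ) :
    ((List.range M).foldl (fun rs k => if k % 2 = 1 then rs.set k (rs[k]!.reverse) else rs)
        ((List.range M).map (rowNat N)))
    = (List.range M).map (fun i => if i % 2 = 1 then (rowNat N i).reverse else rowNat N i) := by
  apply List.ext_getElem?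
  intro k
  rw [foldl_set_getElem? _ (List.nodup_range) _ k]
  by_cases hk : k < M
  · have h1 : ((List.range M).map (rowNat N))[k]? = some (rowNat N k) := by
      simp [List.getElem?_map, List.getElem?_range hk]
    have h2 : ((List.range M).map
        (fun i => if i % 2 = 1 then (rowNat N i).reverse else rowNat N i))[k]?
        = some (if k % 2 = 1 then (rowNat N k).reverse else rowNat N k) := by
      simp [List.getElem?_map, List.getElem?_range hk]
    rw [h2]
    by_cases hp : k % 2 = 1
    · rw [if_pos ⟨List.mem_range.mpr hk, hp⟩, h1, if_pos hp]; rfl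
    · rw [if_neg (by tauto), h1, if_neg hp]
  · have h1 : ((List.range M).map (rowNat N))[k]? = none :=
      List.getElem?_eq_none (by simpa using hk)
    have h2 : ((List.range M).map
        (fun i => if i % 2 = 1 then (rowNat N i).reverse else rowNat N i))[k]? = none :=
      List.getElem?_eq_none (by simpa using hk)
    rw [h1, h2]
    split <;> rfl

/-- Folding with a body that ignores the element is the identity. -/
lemma foldl_keep (init : List Int) : ∀ (l : List Int),
    List.foldl (fun (acc : List Int) (_ : Int) => acc) init l = init := by
  intro l
  induction l generalizing init with
  | nil => rfl
  | cons x xs ih => simpa using ih init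

/-- A on a positive grid is the flattening of the parity-adjusted rows. -/
lemma A_rows (M N : ℕ) :
    gardener_count (M : Int) (N : Int)
      = ((List.range M).map
          (fun i => if i % 2 = 1 then (rowNat N i).reverse else rowNat N i)).flatten := by
  unfold gardener_count
  rw [PySem.List.pyRange_zero_natCast M, List.foldl_map]
  rw [PySem.List.foldl_congr_mem' _ _
    (fun (acc : List Int) (k : ℕ) =>
      acc ++ (if k % 2 = 1 then (rowNat N k).reverse else rowNat N k)) _ ?_]
  · rw [PySem.List.foldl_append_eq_flatMap, List.flatMap_def, List.nil_append]
  · intro k _ acc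
    by_cases hp : k % 2 = 1
    · have hb : ((((k : ℕ) : Int)) % 2 == 0) = false := by
        rw [beq_eq_false_iff_ne]; omega
      simp only [hb, Bool.false_eq_true, if_false]
      rw [PySem.List.foldl_append_singleton_eq_map, if_pos hp]
      congr 1
      rw [PySem.List.pyRange_zero_natCast, List.map_map]
      have h := rowOdd_eq_reverse N k
      push_cast at h
      rw [← h]
      apply List.map_congr_left
      intro j _
      simp [Function.comp]
    · have hb : ((((k : ℕ) : Int)) % 2 == 0) = true := by
        rw [beq_iff_eq]; omega
      simp only [hb, if_true]
      rw [PySem.List.foldl_append_singleton_eq_map, if_neg hp]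
      congr 1
      rw [PySem.List.pyRange_zero_natCast, List.map_map]
      simp only [rowNat]
      apply List.map_congr_left
      intro j _
      simp only [Function.comp]
      push_cast
      ring

/-- B on a positive grid is the same flattening. -/
lemma B_rows (M N : ℕ) (hM : 0 < M) (hN : 0 < N) :
    gardener_count_alt (M : Int) (N : Int)
      = ((List.range M).map
          (fun i => if i % 2 = 1 then (rowNat N i).reverse else rowNat N i)).flatten := by
  unfold gardener_count_alt
  rw [if_neg (by push_neg; constructor <;> [exact_mod_cast hM; exact_mod_cast hN])]
  have hinit : PySem.List.pyRange 1 ((M : Int) * (N : Int) + 1) 1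
      = ((List.range M).map (rowNat N)).flatten := by
    rw [PySem.List.pyRange_one]
    have e : ((M : Int) * (N : Int) + 1 - 1) = ((M * N : ℕ) : Int) := by push_cast; ring
    rw [e, Int.toNat_natCast, range_flatten]
  rw [hinit, PySem.List.pyRange_zero_natCast]
  rw [flat_fold N (List.range M) ((List.range M).map (rowNat N))
    (by intro r hr; rcases List.mem_map.mp hr with ⟨i, _, rfl⟩; exact length_rowNat N i)
    (by intro j hj; simpa using List.mem_range.mp hj)]
  rw [rowsFold_eq]

-- ===== VERDICT (by name: the statement is the Claim_ definition above) =====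
theorem gardener_count_spec : Claim_equal_gardener_count := by
  intro m n _
  unfold Spec_gardener_count
  by_cases hmn : m ≤ 0 ∨ n ≤ 0
  · have hB : gardener_count_alt m n = [] := by
      unfold gardener_count_alt; rw [if_pos hmn]
    rw [hB]
    rcases hmn with hm | hn
    · unfold gardener_count
      rw [PySem.List.pyRange_one_eq_nil hm, List.foldl_nil]
    · unfold gardener_count
      have hinner : PySem.List.pyRange 0 n 1 = [] := PySem.List.pyRange_one_eq_nil hn
      simp only [hinner, List.foldl_nil]
      exact foldl_keep [] _
  · push_neg at hmn
    obtain ⟨hm, hn⟩ := hmn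
    have hm' : ((m.toNat : ℕ) : Int) = m := Int.toNat_of_nonneg (le_of_lt hm)
    have hn' : ((n.toNat : ℕ) : Int) = n := Int.toNat_of_nonneg (le_of_lt hn)
    rw [← hm', ← hn', A_rows, B_rows _ _ (by omega) (by omega)]
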